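-- pv_equiv track=rewrite | github.com/milindp25/Job-Hunter | backend/app/services/ats_rules.py | calculate_format_score
-- ===== SOURCE A (Python) =====
-- from typing import Any  # noqa: TCH003
--
-- _SEVERITY_DEDUCTIONS: dict[str, int] = {
--     "blocker": 70,
--     "critical": 25,
--     "warning": 8,
--     "info": 3,
-- }
--
-- def calculate_format_score(findings: list[dict[str, Any]]) -> tuple[int, bool, bool]:
--     """Calculate an ATS format compliance score from a list of findings.
--
--     Args:
--         findings: List of finding dicts (each with a ``severity`` key).
--
--     Returns:
--         A tuple of (score, has_blocker, has_critical) where score is in [0, 100].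
--     """
--     score = 100
--     has_blocker = False
--     has_critical = False
--
--     for finding in findings:
--         severity = finding.get("severity", "")
--         deduction = _SEVERITY_DEDUCTIONS.get(severity, 0)
--         score -= deduction
--         if severity == "blocker":
--             has_blocker = True
--         elif severity == "critical":
--             has_critical = True
--
--     score = max(0, score)
--     return score, has_blocker, has_critical
-- ===== SOURCE B (Python) =====
-- _SEVERITY_DEDUCTIONS = {
--     "blocker": 70,
--     "critical": 25,
--     "warning": 8,
--     "info": 3,
-- }
--
-- def calculate_format_score(findings):
--     counts = {}
--     for finding in findings:
--         sev = finding.get("severity", "")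
--         counts[sev] = counts.get(sev, 0) + 1
--     total = sum(counts.get(sev, 0) * ded for sev, ded in _SEVERITY_DEDUCTIONS.items())
--     return max(0, 100 - total), counts.get("blocker", 0) > 0, counts.get("critical", 0) > 0
-- ===== Notes on version B (the rewrite author's own statement) =====
-- stated objective: idiomatic
-- what changed: B first builds a frequency table of severities in one counting pass, then computes the score in a second pass over the four severity categories (count * deduction) and reads has_blocker/has_critical off the table, instead of A's single per-finding scan that branches and deducts per finding.
import Mathlib
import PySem

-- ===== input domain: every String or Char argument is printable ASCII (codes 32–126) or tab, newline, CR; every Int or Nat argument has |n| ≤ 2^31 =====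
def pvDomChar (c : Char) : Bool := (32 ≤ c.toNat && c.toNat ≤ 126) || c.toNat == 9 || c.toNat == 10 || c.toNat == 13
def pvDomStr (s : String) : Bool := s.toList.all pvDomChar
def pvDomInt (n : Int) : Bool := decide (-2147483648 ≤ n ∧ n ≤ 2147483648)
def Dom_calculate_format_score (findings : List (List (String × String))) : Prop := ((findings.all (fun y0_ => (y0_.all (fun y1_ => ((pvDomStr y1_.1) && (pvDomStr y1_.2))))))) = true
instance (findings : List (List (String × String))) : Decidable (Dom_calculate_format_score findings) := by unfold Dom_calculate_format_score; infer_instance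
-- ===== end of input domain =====

-- B replaces A's per-finding scan-with-branches by a frequency table of severities built first,
-- then scores in a second pass over the four severity categories (idiomatic aggregate-then-score).

-- module constant _SEVERITY_DEDUCTIONS (shared by both ports, as in Python)
def sevDeductions : PySem.Dict String Int :=
  PySem.Dict.mk [("blocker", 70), ("critical", 25), ("warning", 8), ("info", 3)]

-- ===== PORT A =====
-- loop body of A's for-loop
def stepA (st : Int × Bool × Bool) (finding : List (String × String)) : Int × Bool × Bool :=
  let severity := (PySem.Dict.mk finding).getD "severity" ""
  let deduction := sevDeductions.getD severity 0
  let score := st.1 - deduction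
  if severity == "blocker" then (score, true, st.2.2)
  else if severity == "critical" then (score, st.2.1, true)
  else (score, st.2.1, st.2.2)

def calculate_format_score (findings : List (List (String × String))) : Int × Bool × Bool :=
  let st := findings.foldl stepA (100, false, false)
  (max 0 st.1, st.2.1, st.2.2)

-- ===== PORT B =====
-- loop body of B's counting loop
def stepB (c : PySem.Dict String Int) (finding : List (String × String)) : PySem.Dict String Int :=
  let sev := (PySem.Dict.mk finding).getD "severity" ""
  c.insert sev (c.getD sev 0 + 1)

def calculate_format_score_alt (findings : List (List (String × String))) : Int × Bool × Bool :=
  let counts := findings.foldl stepB PySem.Dict.empty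
  let total := sevDeductions.items.foldl (fun acc p => acc + counts.getD p.1 0 * p.2) 0
  (max 0 (100 - total), decide (0 < counts.getD "blocker" 0), decide (0 < counts.getD "critical" 0))

-- ===== PRECONDITION & SPEC =====
def Spec_calculate_format_score (findings : List (List (String × String))) (out : Int × Bool × Bool) : Prop := out = calculate_format_score_alt findings
instance (findings : List (List (String × String))) (out : Int × Bool × Bool) : Decidable (Spec_calculate_format_score findings out) := by unfold Spec_calculate_format_score; infer_instance

-- ===== CLAIM (what is proved, stated in full; the proofs are below) =====
def Claim_equal_calculate_format_score : Prop := ∀ (findings : List (List (String × String))), Dom_calculate_format_score findings → Spec_calculate_format_score findings (calculate_format_score findings)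

-- ===== LEMMAS AND PROOFS =====

def sevOf (finding : List (String × String)) : String :=
  (PySem.Dict.mk finding).getD "severity" ""

lemma getD_sevDeductions (s : String) :
    sevDeductions.getD s 0 =
      if "blocker" = s then 70 else if "critical" = s then 25
      else if "warning" = s then 8 else if "info" = s then 3 else 0 := by
  simp only [sevDeductions, PySem.Dict.getD_eq_get?_getD, PySem.Dict.get?_mk_cons, beq_iff_eq]
  split_ifs <;> rfl

lemma counts_char (l : List (List (String × String))) (c : PySem.Dict String Int) (k : String) :
    (l.foldl stepB c).getD k 0 = c.getD k 0 + ((l.map sevOf).count k : Int) := by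
  induction l generalizing c with
  | nil => simp
  | cons x xs ih =>
      rw [List.foldl_cons, ih]
      have hstep : (stepB c x).getD k 0 = c.getD k 0 + (if k = sevOf x then 1 else 0) := by
        simp only [stepB, sevOf, PySem.Dict.getD_insert]
        split_ifs with h
        · rw [h]
        · ring
      rw [hstep]
      simp only [List.map_cons, List.count_cons, beq_iff_eq]
      by_cases h : sevOf x = k
      · simp [h]; push_cast; ring
      · simp [h]
        exact fun hk => h hk.symm

lemma aloop_char (l : List (List (String × String))) (s : Int) (hb hc : Bool) :
    l.foldl stepA (s, hb, hc)
    = (s - (70 * ((l.map sevOf).count "blocker" : Int) + 25 * ((l.map sevOf).count "critical" : Int)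
            + 8 * ((l.map sevOf).count "warning" : Int) + 3 * ((l.map sevOf).count "info" : Int)),
       hb || (l.map sevOf).any (· == "blocker"), hc || (l.map sevOf).any (· == "critical")) := by
  induction l generalizing s hb hc with
  | nil => simp
  | cons x xs ih =>
      rw [List.foldl_cons]
      by_cases hB : sevOf x = "blocker"
      · have h1 : stepA (s, hb, hc) x = (s - 70, true, hc) := by
          simp [stepA, show (PySem.Dict.mk x).getD "severity" "" = "blocker" from hB,
                getD_sevDeductions]
        rw [h1, ih]
        simp [List.count_cons, hB, List.any_cons]
        push_cast; ring
      · by_cases hC : sevOf x = "critical"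
        · have h1 : stepA (s, hb, hc) x = (s - 25, hb, true) := by
            simp [stepA, show (PySem.Dict.mk x).getD "severity" "" = "critical" from hC,
                  getD_sevDeductions]
          rw [h1, ih]
          simp [List.count_cons, hC, List.any_cons,
                show ¬ ("blocker" : String) = "critical" by decide]
          push_cast; ring
        · by_cases hW : sevOf x = "warning"
          · have h1 : stepA (s, hb, hc) x = (s - 8, hb, hc) := by
              simp [stepA, show (PySem.Dict.mk x).getD "severity" "" = "warning" from hW,
                    getD_sevDeductions]
            rw [h1, ih]
            simp [List.count_cons, hW, List.any_cons]
            push_cast; ring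
          · by_cases hI : sevOf x = "info"
            · have h1 : stepA (s, hb, hc) x = (s - 3, hb, hc) := by
                simp [stepA, show (PySem.Dict.mk x).getD "severity" "" = "info" from hI,
                      getD_sevDeductions]
              rw [h1, ih]
              simp [List.count_cons, hI, List.any_cons]
              push_cast; ring
            · have h1 : stepA (s, hb, hc) x = (s - 0, hb, hc) := by
                have hx : (PySem.Dict.mk x).getD "severity" "" = sevOf x := rfl
                simp only [stepA, hx, getD_sevDeductions, beq_iff_eq]
                rw [if_neg hB, if_neg hC,
                    if_neg (fun h => hB h.symm), if_neg (fun h => hC h.symm),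
                    if_neg (fun h => hW h.symm), if_neg (fun h => hI h.symm)]
              rw [h1, ih]
              have e1 : (sevOf x == "blocker") = false := beq_eq_false_iff_ne.mpr hB
              have e2 : (sevOf x == "critical") = false := beq_eq_false_iff_ne.mpr hC
              simp [List.count_cons, List.any_cons, e1, e2, hB, hC, hW, hI]

-- ===== VERDICT (by name: the statement is the Claim_ definition above) =====
theorem calculate_format_score_spec : Claim_equal_calculate_format_score := by
  intro findings _
  unfold Spec_calculate_format_score calculate_format_score calculate_format_score_alt
  rw [aloop_char]
  simp only [sevDeductions, PySem.Dict.items, List.foldl_cons, List.foldl_nil]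
  simp only [counts_char]
  simp only [PySem.Dict.getD_empty, List.map_nil]
  refine Prod.ext ?_ (Prod.ext ?_ ?_)
  · simp; ring_nf
  · rw [Bool.eq_iff_iff]
    simp [List.any_eq_true, Int.natCast_pos, List.count_pos_iff, List.mem_map]
  · rw [Bool.eq_iff_iff]
    simp [List.any_eq_true, Int.natCast_pos, List.count_pos_iff, List.mem_map]
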